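-- pv_equiv track=rewrite | github.com/Matthewous/pythonProject3 | py-homeworks-basic/Functions/main.py | shelf_by_doc
-- ===== SOURCE A (Python) =====
-- directories = {
--   '1': ['2207 876234', '11-2', '5455 028765'],
--   '2': ['10006'],
--   '3': []
-- }
--
-- def shelf_by_doc(number):
--
--     shelf = None
--     for shelf_number, docs in directories.items():
--         if number in docs:
--             shelf = shelf_number
--
--     if shelf is None:
--         result = f"\nДокумент не найден\n-----------"
--     else:
--         result = f'Документ находится на полке {shelf}\n-----------'
--
--     return result
-- ===== SOURCE B (Python) =====
-- directories = {
--   '1': ['2207 876234', '11-2', '5455 028765'],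
--   '2': ['10006'],
--   '3': []
-- }
--
-- # Reverse index built once: doc -> shelf, iterating shelves in order so a repeated doc maps to its last shelf.
-- doc_to_shelf = {doc: shelf for shelf, docs in directories.items() for doc in docs}
--
-- def shelf_by_doc(number):
--     shelf = doc_to_shelf.get(number)
--     if shelf is None:
--         result = f"\nДокумент не найден\n-----------"
--     else:
--         result = f'Документ находится на полке {shelf}\n-----------'
--     return result
-- ===== Notes on version B (the rewrite author's own statement) =====
-- stated objective: simpler
-- what changed: Replaces the per-call last-wins scan over all shelves with a module-level reverse index doc->shelf built once, so shelf_by_doc is a single dict lookup with no loop.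
import Mathlib
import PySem

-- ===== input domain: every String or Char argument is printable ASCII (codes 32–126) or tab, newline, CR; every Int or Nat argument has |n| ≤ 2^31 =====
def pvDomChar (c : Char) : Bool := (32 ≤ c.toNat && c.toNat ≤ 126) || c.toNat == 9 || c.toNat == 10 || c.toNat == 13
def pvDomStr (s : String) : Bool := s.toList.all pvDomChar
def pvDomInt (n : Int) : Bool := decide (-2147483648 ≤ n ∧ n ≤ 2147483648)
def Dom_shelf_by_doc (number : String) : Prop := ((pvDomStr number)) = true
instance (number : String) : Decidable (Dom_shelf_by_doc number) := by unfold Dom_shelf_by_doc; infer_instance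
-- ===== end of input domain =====

-- B builds a doc→shelf reverse index once and looks the document up, instead of A's per-call scan over every shelf (simpler).

-- ===== PORT A =====
def directoriesA : List (String × List String) :=
  [("1", ["2207 876234", "11-2", "5455 028765"]), ("2", ["10006"]), ("3", [])]

def shelf_by_doc (number : String) : String :=
  let shelf : Option String :=
    directoriesA.foldl (fun acc p => if number ∈ p.2 then some p.1 else acc) none
  match shelf with
  | none => "\nДокумент не найден\n-----------"
  | some s => "Документ находится на полке " ++ s ++ "\n-----------"

-- ===== PORT B =====
def doc_to_shelf : PySem.Dict String String :=
  directoriesA.foldl (fun d p => p.2.foldl (fun d doc => d.insert doc p.1) d) (PySem.Dict.empty)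

def shelf_by_doc_alt (number : String) : String :=
  match doc_to_shelf.get? number with
  | none => "\nДокумент не найден\n-----------"
  | some s => "Документ находится на полке " ++ s ++ "\n-----------"

-- ===== PRECONDITION & SPEC =====
def Spec_shelf_by_doc (number : String) (out : String) : Prop := out = shelf_by_doc_alt number
instance (number : String) (out : String) : Decidable (Spec_shelf_by_doc number out) := by unfold Spec_shelf_by_doc; infer_instance

-- ===== CLAIM (what is proved, stated in full; the proofs are below) =====
def Claim_equal_shelf_by_doc : Prop := ∀ (number : String), Dom_shelf_by_doc number → Spec_shelf_by_doc number (shelf_by_doc number)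

-- ===== LEMMAS AND PROOFS =====

-- B's index, evaluated once to its literal association list.
theorem doc_to_shelf_eq : doc_to_shelf = PySem.Dict.mk
    [("2207 876234", "1"), ("11-2", "1"), ("5455 028765", "1"), ("10006", "2")] := by
  rfl

-- ===== VERDICT (by name: the statement is the Claim_ definition above) =====
theorem shelf_by_doc_spec : Claim_equal_shelf_by_doc := by
  intro number _
  unfold Spec_shelf_by_doc
  by_cases h1 : number = "2207 876234"
  · subst h1; rfl
  by_cases h2 : number = "11-2"
  · subst h2; rfl
  by_cases h3 : number = "5455 028765"
  · subst h3; rfl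
  by_cases h4 : number = "10006"
  · subst h4; rfl
  rw [shelf_by_doc, shelf_by_doc_alt, doc_to_shelf_eq]
  simp only [directoriesA, List.foldl, List.mem_cons, List.not_mem_nil, or_false,
    PySem.Dict.get?_mk_cons]
  simp [h1, h2, h3, h4, Ne.symm h1, Ne.symm h2, Ne.symm h3, Ne.symm h4, PySem.Dict.get?]
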